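-- pv_equiv track=rewrite | github.com/sky7th/BOJ | programmers/네이버 핵데이 윈터 2019/핵데이2번.py | solution
-- ===== SOURCE A (Python) =====
-- from collections import deque as queue
-- from collections import defaultdict
--
-- def solution(maps):
--     answer = []
--     couple = []
--     dx = [1,-1,0,0]
--     dy = [0,0,1,-1]
--     n = len(maps)
--     m = len(maps[0])
--     for i, v in enumerate(maps):  # 2차원 필드로 만들고
--         maps[i] = list(v)
--     for i in range(n):  # 필드를 돌면서
--         for j in range(m):
--             if(maps[i][j] != '.'): # 현재 위치가 나라일 경우
--                 name = maps[i][j] # 나라 이름을 기억해 둠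
--                 maps[i][j] = '.'  # 지난 곳은 방문 처리를 함
--                 q = queue()
--                 q.append((i, j))
--                 while len(q) != 0:  # 현재 위치로 부터 동서남북으로 BFS 탐색을 시작함
--                     cur = q.popleft()
--                     for dir in range(4):
--                         ny = cur[0] + dy[dir]
--                         nx = cur[1] + dx[dir]
--                         if ny<0 or ny>=n or nx<0 or nx>=m or maps[ny][nx]=='.': # 필드 밖에 나가거나 나라가 아닌 경우 예외 처리
--                             continue
--                         if maps[ny][nx] == name:  # 다음 위치가 현재 나라와 같은 경우 큐에 추가
--                             q.append((ny,nx))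
--                             maps[ny][nx] = '.'
--                         else: # 다음 위차가 다른 나라일 경우(국경을 공유)
--                             c = sorted((name, maps[ny][nx]))
--                             if c not in couple: # 중복되지 않게 그 쌍을 저장해놓음
--                                 couple.append(c)
--     d = defaultdict(list) # 각 나라에서 국경을 공유하는 나라가 얼마나 있는지 알기 위해 dict 생성
--     for c in couple:
--         d[c[0]].append(c[1])
--     max_couple_num = 0
--     for c in d: # dict 를 돌면서 국경을 공유하는 나라 개수가 가장 많은 경우를 고름
--         l = len(d[c])
--         if max_couple_num < l:
--             max_couple_num = l
--     answer.append(len(couple))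
--     answer.append(max_couple_num)
--
--     return answer
-- ===== SOURCE B (Python) =====
-- def solution(maps):
--     n = len(maps)
--     m = len(maps[0])
--     grid = [list(r) for r in maps]
--     pairs = set()
--     for i in range(n):
--         for j in range(m):
--             a = grid[i][j]
--             if a == '.':
--                 continue
--             for y, x in ((i + 1, j), (i, j + 1)):
--                 if y < n and x < m:
--                     b = grid[y][x]
--                     if b != '.' and b != a:
--                         pairs.add((min(a, b), max(a, b)))
--     counts = {}
--     for p, q in pairs:
--         counts[p] = counts.get(p, 0) + 1
--     return [len(pairs), max(counts.values(), default=0)]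
-- ===== Notes on version B (the rewrite author's own statement) =====
-- stated objective: simpler
-- what changed: Replaces the per-country BFS flood fill (queue, visited-blanking and a linear 'pair not in couple' duplicate scan) by a single right/down pass over the grid that collects each adjacent distinct pair into a set, then counts and groups by the smaller element; Pre_ excludes the inputs on which A raises IndexError (empty list, or a row shorter than the first row); B does not reproduce A's in-place blanking of maps (return value only).
import Mathlib
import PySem

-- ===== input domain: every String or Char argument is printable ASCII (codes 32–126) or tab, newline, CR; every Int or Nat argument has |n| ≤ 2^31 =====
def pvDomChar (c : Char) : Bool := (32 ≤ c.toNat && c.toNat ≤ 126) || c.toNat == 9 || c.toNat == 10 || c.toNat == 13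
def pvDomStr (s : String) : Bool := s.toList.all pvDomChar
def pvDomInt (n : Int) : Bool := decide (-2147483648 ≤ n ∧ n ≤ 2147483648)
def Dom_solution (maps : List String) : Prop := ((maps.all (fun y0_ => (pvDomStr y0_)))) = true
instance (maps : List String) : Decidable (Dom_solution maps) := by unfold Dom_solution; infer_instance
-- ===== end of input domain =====

-- B replaces A's per-country BFS flood fill (queue + visited-blanking + linear duplicate scan
-- of the pair list) by a single right/down pass over the grid collecting border pairs into a
-- set; the Python A mutates `maps` in place (it ends as an all-'.' grid of lists) and B does
-- not — the equivalence proved here is about the RETURN value only.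


-- ===== PORT A =====
-- maps[i][j] read; guards in A precede every access, so the defaults are never observed
def getc (g : List (List Char)) (i j : Int) : Char :=
  if 0 ≤ i ∧ 0 ≤ j then (g.getD i.toNat []).getD j.toNat '.' else '.'

-- maps[i][j] = '.'
def setc (g : List (List Char)) (i j : Int) : List (List Char) :=
  if 0 ≤ i ∧ 0 ≤ j then g.set i.toNat ((g.getD i.toNat []).set j.toNat '.') else g

-- sorted((a, b)) for two chars
def sortedPair (a b : Char) : Char × Char := if a ≤ b then (a, b) else (b, a)

-- (dy, dx) pairs in A's dir order 0..3
def dirsA : List (Int × Int) := [(0, 1), (0, -1), (1, 0), (-1, 0)]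

-- number of non-'.' cells: termination measure for the BFS while-loop
def nondot (g : List (List Char)) : Nat := (g.map (fun r => r.countP (fun c => c != '.'))).sum

def visitA (name : Char) (n m : Int) (cur : Int × Int)
    (st : List (List Char) × List (Int × Int) × List (Char × Char)) (d : Int × Int) :
    List (List Char) × List (Int × Int) × List (Char × Char) :=
  if cur.1 + d.1 < 0 ∨ n ≤ cur.1 + d.1 ∨ cur.2 + d.2 < 0 ∨ m ≤ cur.2 + d.2
      ∨ getc st.1 (cur.1 + d.1) (cur.2 + d.2) = '.' then st
  else if getc st.1 (cur.1 + d.1) (cur.2 + d.2) = name then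
    (setc st.1 (cur.1 + d.1) (cur.2 + d.2), st.2.1 ++ [(cur.1 + d.1, cur.2 + d.2)], st.2.2)
  else if sortedPair name (getc st.1 (cur.1 + d.1) (cur.2 + d.2)) ∈ st.2.2 then st
  else (st.1, st.2.1, st.2.2 ++ [sortedPair name (getc st.1 (cur.1 + d.1) (cur.2 + d.2))])


-- the next six lemmas only justify termination of the BFS while-loop (cited in decreasing_by)
theorem countP_set_dot (r : List Char) (j : Nat) (h : r.getD j '.' ≠ '.') :
    (r.set j '.').countP (fun c => c != '.') + 1 = r.countP (fun c => c != '.') := by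
  induction r generalizing j with
  | nil => simp [List.getD] at h
  | cons x t ih =>
    cases j with
    | zero =>
      simp [List.getD] at h
      simp [List.countP_cons, h]
    | succ j =>
      have := ih j (by simpa [List.getD] using h)
      simp only [List.set, List.countP_cons]
      omega

theorem sum_set_pred (l : List Nat) (i : Nat) (a : Nat) (h : a + 1 = l.getD i 0) :
    ((l.set i a).sum + 1 = l.sum) := by
  induction l generalizing i with
  | nil => simp [List.getD] at h
  | cons x t ih =>
    cases i with
    | zero => simp [List.getD] at h; simp [List.set]; omega
    | succ i =>
      have := ih i (by simpa [List.getD] using h)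
      simp only [List.set, List.sum_cons]
      omega

theorem getD_map_countP (g : List (List Char)) (it : Nat) (hit : it < g.length) :
    (List.map (fun r => List.countP (fun c => c != '.') r) g).getD it 0
      = List.countP (fun c => c != '.') (g.getD it []) := by
  unfold List.getD
  rw [List.getElem?_map, List.getElem?_eq_getElem hit]
  simp

theorem nondot_setc (g : List (List Char)) (i j : Int) (h : getc g i j ≠ '.') :
    nondot (setc g i j) + 1 = nondot g := by
  by_cases hp : 0 ≤ i ∧ 0 ≤ j
  · simp only [getc, if_pos hp] at h
    simp only [setc, if_pos hp, nondot]
    set it := i.toNat with hitdef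
    set jt := j.toNat
    have hrow := countP_set_dot (g.getD it []) jt h
    have hit : it < g.length := by
      by_contra hge
      apply h
      have hnil : g.getD it [] = [] := by
        unfold List.getD
        rw [List.getElem?_eq_none (by omega)]
        rfl
      rw [hnil]
      rfl
    rw [List.map_set]
    apply sum_set_pred
    rw [getD_map_countP g it hit]
    exact hrow
  · simp [getc, if_neg hp] at h

theorem visitA_meas (name : Char) (n m : Int) (cur : Int × Int)
    (st : List (List Char) × List (Int × Int) × List (Char × Char)) (d : Int × Int) :
    2 * nondot (visitA name n m cur st d).1 + (visitA name n m cur st d).2.1.length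
      ≤ 2 * nondot st.1 + st.2.1.length := by
  unfold visitA
  split
  · exact le_refl _
  · split
    · rename_i hdot hname
      have hne : getc st.1 (cur.1 + d.1) (cur.2 + d.2) ≠ '.' := by
        intro hc; exact hdot (Or.inr (Or.inr (Or.inr (Or.inr hc))))
      have := nondot_setc st.1 (cur.1 + d.1) (cur.2 + d.2) hne
      simp only [List.length_append, List.length_singleton]
      omega
    · split
      · exact le_refl _
      · simp

theorem foldl_visitA_meas (name : Char) (n m : Int) (cur : Int × Int)
    (ds : List (Int × Int)) (st : List (List Char) × List (Int × Int) × List (Char × Char)) :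
    2 * nondot (ds.foldl (visitA name n m cur) st).1 + (ds.foldl (visitA name n m cur) st).2.1.length
      ≤ 2 * nondot st.1 + st.2.1.length := by
  induction ds generalizing st with
  | nil => exact le_refl _
  | cons d ds ih =>
    exact le_trans (ih (visitA name n m cur st d)) (visitA_meas name n m cur st d)

def bfsA (name : Char) (n m : Int) :
    List (List Char) × List (Int × Int) × List (Char × Char) → List (List Char) × List (Char × Char)
  | (g, [], c) => (g, c)
  | (g, cur :: q, c) => bfsA name n m (dirsA.foldl (visitA name n m cur) (g, q, c))
termination_by st => 2 * nondot st.1 + st.2.1.length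
decreasing_by
  have h := foldl_visitA_meas name n m cur dirsA (g, q, c)
  dsimp only at h ⊢
  simp only [List.length_cons] at *
  omega

def scanCell (n m : Int) (st : List (List Char) × List (Char × Char)) (i j : Nat) :
    List (List Char) × List (Char × Char) :=
  if getc st.1 i j ≠ '.' then
    bfsA (getc st.1 i j) n m (setc st.1 i j, [((i : Int), (j : Int))], st.2)
  else st

def solution (maps : List String) : List Int :=
  let n := maps.length
  let m := (maps.headD "").toList.length
  let g0 := maps.map (fun v => v.toList)
  let r := (List.range n).foldl
      (fun st i => (List.range m).foldl (fun st j => scanCell (n : Int) (m : Int) st i j) st)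
      (g0, ([] : List (Char × Char)))
  let d := r.2.foldl (fun d p => d.modify p.1 [] (fun l => l ++ [p.2]))
      (PySem.Dict.empty : PySem.Dict Char (List Char))
  let mx := d.keys.foldl
      (fun mx k => if mx < ((d.getD k []).length : Int) then ((d.getD k []).length : Int) else mx)
      (0 : Int)
  [(r.2.length : Int), mx]


-- ===== PORT B =====
def solution_alt (maps : List String) : List Int :=
  let n := maps.length
  let m := (maps.headD "").toList.length
  let grid := maps.map (fun r => r.toList)
  let pairs := (List.range n).foldl (fun ps i =>
      (List.range m).foldl (fun ps j =>
        let a := (grid.getD i []).getD j '.'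
        if a = '.' then ps
        else [(i + 1, j), (i, j + 1)].foldl (fun ps yx =>
          if yx.1 < n ∧ yx.2 < m then
            let b := (grid.getD yx.1 []).getD yx.2 '.'
            if b ≠ '.' ∧ b ≠ a then PySem.Set.add ps (min a b, max a b) else ps
          else ps) ps) ps)
    (PySem.Set.empty : PySem.Set (Char × Char))
  let counts := pairs.foldl (fun d p => d.insert p.1 (d.getD p.1 0 + 1))
      (PySem.Dict.empty : PySem.Dict Char Int)
  [PySem.Set.len pairs, PySem.List.maxD counts.values (fun x => x) 0]



-- ===== PRECONDITION & SPEC =====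
-- Pre_ excludes exactly the inputs on which the Python A raises IndexError: the empty list
-- (maps[0]) and grids having some row shorter than the first row (the scan reads maps[i][j]
-- for every j < len(maps[0]) in every row); A returns normally on every other input.
def Pre_solution (maps : List String) : Prop :=
  maps ≠ [] ∧ ∀ r ∈ maps, (maps.headD "").toList.length ≤ r.toList.length

instance (maps : List String) : Decidable (Pre_solution maps) := by
  unfold Pre_solution; infer_instance

def pvWitness_solution : List String := (["ab", "ba"])

def Spec_solution (maps : List String) (out : List Int) : Prop := out = solution_alt maps
instance (maps : List String) (out : List Int) : Decidable (Spec_solution maps out) := by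
  unfold Spec_solution; infer_instance

-- ===== CLAIM (what is proved, stated in full; the proofs are below) =====
def Claim_equal_solution : Prop :=
  ∀ (maps : List String), Dom_solution maps → Pre_solution maps → Spec_solution maps (solution maps)

-- ===== LEMMAS AND PROOFS =====
-- ===== proof helpers =====
def InB (n m : Int) (w : Int × Int) : Prop := 0 ≤ w.1 ∧ w.1 < n ∧ 0 ≤ w.2 ∧ w.2 < m

def OnlyBlank (name : Char) (g g' : List (List Char)) : Prop :=
  ∀ w : Int × Int, getc g' w.1 w.2 = getc g w.1 w.2 ∨ (getc g w.1 w.2 = name ∧ getc g' w.1 w.2 = '.')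

def SubG (g G : List (List Char)) : Prop :=
  ∀ w : Int × Int, getc g w.1 w.2 = getc G w.1 w.2 ∨ getc g w.1 w.2 = '.'

def PairIn (G : List (List Char)) (n m : Int) (p : Char × Char) : Prop :=
  ∃ u d : Int × Int, d ∈ dirsA ∧ InB n m u ∧ InB n m (u.1 + d.1, u.2 + d.2) ∧
    getc G u.1 u.2 ≠ '.' ∧ getc G (u.1 + d.1) (u.2 + d.2) ≠ '.' ∧
    getc G (u.1 + d.1) (u.2 + d.2) ≠ getc G u.1 u.2 ∧
    p = sortedPair (getc G u.1 u.2) (getc G (u.1 + d.1) (u.2 + d.2))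

theorem getc_natCast (g : List (List Char)) (i j : Nat) :
    getc g (i : Int) (j : Int) = (g.getD i []).getD j '.' := by
  simp [getc]

theorem getD_set_list {α} (l : List α) (i j : Nat) (a d : α) :
    (l.set i a).getD j d = if i = j ∧ i < l.length then a else l.getD j d := by
  unfold List.getD
  rw [List.getElem?_set]
  by_cases hij : i = j
  · subst hij
    by_cases hl : i < l.length
    · simp [hl]
    · simp [hl]
  · simp [hij]

theorem getc_setc (g : List (List Char)) (i j a b : Int) :
    getc (setc g i j) a b = if a = i ∧ b = j then '.' else getc g a b := by
  by_cases hp : 0 ≤ i ∧ 0 ≤ j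
  · by_cases hq : 0 ≤ a ∧ 0 ≤ b
    · simp only [getc, setc, if_pos hp, if_pos hq]
      rw [getD_set_list]
      by_cases h1 : i.toNat = a.toNat ∧ i.toNat < g.length
      · rw [if_pos h1, getD_set_list]
        have hia : i = a := by omega
        by_cases h2 : j = b
        · rw [if_pos (show a = i ∧ b = j by omega)]
          split
          · rfl
          · rename_i hlt
            have hb : j.toNat = b.toNat := by omega
            unfold List.getD at hlt ⊢
            rw [List.getElem?_eq_none (by omega)]
            rfl
        · have hjb : ¬ (a = i ∧ b = j) := fun hc => h2 hc.2.symm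
          rw [if_neg (by omega : ¬ (j.toNat = b.toNat ∧ j.toNat < (g.getD i.toNat []).length)),
              if_neg hjb, ← h1.1]
      · rw [if_neg h1]
        by_cases hij : a = i ∧ b = j
        · rw [if_pos hij]
          obtain ⟨rfl, rfl⟩ := hij
          unfold List.getD
          rw [List.getElem?_eq_none (show g.length ≤ a.toNat by omega)]
          rfl
        · rw [if_neg hij]
    · simp only [getc, setc, if_pos hp, if_neg hq]
      by_cases hij : a = i ∧ b = j
      · exfalso; exact hq ⟨hij.1 ▸ hp.1, hij.2 ▸ hp.2⟩
      · rw [if_neg hij]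
  · simp only [setc, if_neg hp]
    by_cases hij : a = i ∧ b = j
    · rw [if_pos hij]
      obtain ⟨rfl, rfl⟩ := hij
      simp only [getc, if_neg hp]
    · rw [if_neg hij]

theorem onlyBlank_refl (name : Char) (g : List (List Char)) : OnlyBlank name g g :=
  fun _ => Or.inl rfl

theorem onlyBlank_trans {name : Char} {g g' g'' : List (List Char)}
    (h1 : OnlyBlank name g g') (h2 : OnlyBlank name g' g'') : OnlyBlank name g g'' := by
  intro w
  rcases h2 w with h | ⟨ha, hb⟩
  · rcases h1 w with h' | ⟨ha', hb'⟩
    · exact Or.inl (h.trans h')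
    · exact Or.inr ⟨ha', h.trans hb'⟩
  · rcases h1 w with h' | ⟨ha', hb'⟩
    · exact Or.inr ⟨h' ▸ ha, hb⟩
    · exact Or.inr ⟨ha', hb⟩

theorem onlyBlank_dot {name : Char} {g g' : List (List Char)} {w : Int × Int}
    (h : OnlyBlank name g g') (hd : getc g w.1 w.2 = '.') : getc g' w.1 w.2 = '.' := by
  rcases h w with h' | ⟨_, hb⟩
  · exact h'.trans hd
  · exact hb

theorem onlyBlank_keep {name : Char} {g g' : List (List Char)} {w : Int × Int}
    (h : OnlyBlank name g g') (hne : getc g w.1 w.2 ≠ name) :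
    getc g' w.1 w.2 = getc g w.1 w.2 := by
  rcases h w with h' | ⟨ha, _⟩
  · exact h'
  · exact absurd ha hne

theorem onlyBlank_back {name : Char} {g g' : List (List Char)} {w : Int × Int}
    (h : OnlyBlank name g g') (hne : getc g' w.1 w.2 ≠ '.') :
    getc g w.1 w.2 = getc g' w.1 w.2 := by
  rcases h w with h' | ⟨_, hb⟩
  · exact h'.symm
  · exact absurd hb hne

theorem visitA_spec (name : Char) (n m : Int) (cur : Int × Int)
    (st : List (List Char) × List (Int × Int) × List (Char × Char)) (d : Int × Int) :
    OnlyBlank name st.1 (visitA name n m cur st d).1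
    ∧ (∃ e, (visitA name n m cur st d).2.1 = st.2.1 ++ e
        ∧ (∀ w ∈ e, InB n m w ∧ getc st.1 w.1 w.2 = name ∧ getc (visitA name n m cur st d).1 w.1 w.2 = '.')
        ∧ (∀ w : Int × Int, getc (visitA name n m cur st d).1 w.1 w.2 ≠ getc st.1 w.1 w.2 → w ∈ e))
    ∧ (∀ p ∈ (visitA name n m cur st d).2.2, p ∈ st.2.2
        ∨ (InB n m (cur.1 + d.1, cur.2 + d.2) ∧ getc st.1 (cur.1 + d.1) (cur.2 + d.2) ≠ '.'
            ∧ getc st.1 (cur.1 + d.1) (cur.2 + d.2) ≠ name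
            ∧ p = sortedPair name (getc st.1 (cur.1 + d.1) (cur.2 + d.2))))
    ∧ (∀ p ∈ st.2.2, p ∈ (visitA name n m cur st d).2.2)
    ∧ (st.2.2.Nodup → (visitA name n m cur st d).2.2.Nodup)
    ∧ (InB n m (cur.1 + d.1, cur.2 + d.2) → getc st.1 (cur.1 + d.1) (cur.2 + d.2) ≠ '.'
        → getc st.1 (cur.1 + d.1) (cur.2 + d.2) ≠ name
        → sortedPair name (getc st.1 (cur.1 + d.1) (cur.2 + d.2)) ∈ (visitA name n m cur st d).2.2) := by
  unfold visitA
  split_ifs with h1 h2 h3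
  · refine ⟨onlyBlank_refl name st.1, ⟨[], by simp, by simp, fun w hne => absurd rfl hne⟩,
      fun p hp => Or.inl hp, fun p hp => hp, fun h => h, fun hin hdot _ => ?_⟩
    exfalso
    rcases hin with ⟨ha, hb, hc, hd⟩
    rcases h1 with h | h | h | h | h
    · omega
    · omega
    · omega
    · omega
    · exact hdot h
  · -- enqueue and blank
    push Not at h1
    obtain ⟨hb1, hb2, hb3, hb4, hb5⟩ := h1
    refine ⟨?_, ⟨[(cur.1 + d.1, cur.2 + d.2)], rfl, ?_, ?_⟩,
      fun p hp => Or.inl hp, fun p hp => hp, fun h => h, fun _ _ hne => absurd h2 hne⟩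
    · intro w
      rw [getc_setc]
      by_cases hw : w.1 = cur.1 + d.1 ∧ w.2 = cur.2 + d.2
      · rw [if_pos hw]
        exact Or.inr ⟨by rw [hw.1, hw.2]; exact h2, rfl⟩
      · rw [if_neg hw]; exact Or.inl rfl
    · intro w hw
      simp only [List.mem_singleton] at hw
      subst hw
      exact ⟨⟨by omega, by omega, by omega, by omega⟩, h2, by rw [getc_setc]; simp⟩
    · intro w hne
      rw [getc_setc] at hne
      by_cases hw : w.1 = cur.1 + d.1 ∧ w.2 = cur.2 + d.2
      · simp only [List.mem_singleton]
        exact Prod.ext hw.1 hw.2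
      · rw [if_neg hw] at hne
        exact absurd rfl hne
  · refine ⟨onlyBlank_refl name st.1, ⟨[], by simp, by simp, fun w hne => absurd rfl hne⟩,
      fun p hp => Or.inl hp, fun p hp => hp, fun h => h, fun _ _ _ => h3⟩
  · push Not at h1
    obtain ⟨hb1, hb2, hb3, hb4, hb5⟩ := h1
    refine ⟨onlyBlank_refl name st.1, ⟨[], by simp, by simp, fun w hne => absurd rfl hne⟩,
      ?_, fun p hp => List.mem_append_left _ hp, ?_, ?_⟩
    · intro p hp
      rcases List.mem_append.mp hp with h | h
      · exact Or.inl h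
      · simp only [List.mem_singleton] at h
        exact Or.inr ⟨⟨by omega, by omega, by omega, by omega⟩, hb5, h2, h⟩
    · intro hnd
      exact List.Nodup.append hnd (List.nodup_singleton _)
        (by intro a ha hb; simp only [List.mem_singleton] at hb; subst hb; exact h3 ha)
    · intro _ _ _
      exact List.mem_append_right _ (List.mem_singleton.mpr rfl)

theorem foldVisit_spec (name : Char) (hname : name ≠ '.') (n m : Int) (cur : Int × Int)
    (ds : List (Int × Int)) :
    ∀ st : List (List Char) × List (Int × Int) × List (Char × Char),
    OnlyBlank name st.1 (ds.foldl (visitA name n m cur) st).1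
    ∧ (∃ e, (ds.foldl (visitA name n m cur) st).2.1 = st.2.1 ++ e
        ∧ (∀ w ∈ e, InB n m w ∧ getc st.1 w.1 w.2 = name
            ∧ getc (ds.foldl (visitA name n m cur) st).1 w.1 w.2 = '.')
        ∧ (∀ w : Int × Int,
            getc (ds.foldl (visitA name n m cur) st).1 w.1 w.2 ≠ getc st.1 w.1 w.2 → w ∈ e))
    ∧ (∀ p ∈ (ds.foldl (visitA name n m cur) st).2.2, p ∈ st.2.2
        ∨ ∃ dd ∈ ds, InB n m (cur.1 + dd.1, cur.2 + dd.2)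
            ∧ getc st.1 (cur.1 + dd.1) (cur.2 + dd.2) ≠ '.'
            ∧ getc st.1 (cur.1 + dd.1) (cur.2 + dd.2) ≠ name
            ∧ p = sortedPair name (getc st.1 (cur.1 + dd.1) (cur.2 + dd.2)))
    ∧ (∀ p ∈ st.2.2, p ∈ (ds.foldl (visitA name n m cur) st).2.2)
    ∧ (st.2.2.Nodup → (ds.foldl (visitA name n m cur) st).2.2.Nodup)
    ∧ (∀ dd ∈ ds, InB n m (cur.1 + dd.1, cur.2 + dd.2)
        → getc st.1 (cur.1 + dd.1) (cur.2 + dd.2) ≠ '.'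
        → getc st.1 (cur.1 + dd.1) (cur.2 + dd.2) ≠ name
        → sortedPair name (getc st.1 (cur.1 + dd.1) (cur.2 + dd.2))
            ∈ (ds.foldl (visitA name n m cur) st).2.2) := by
  induction ds with
  | nil =>
    intro st
    exact ⟨onlyBlank_refl name st.1, ⟨[], by simp, by simp, fun w hne => absurd rfl hne⟩,
      fun p hp => Or.inl hp, fun p hp => hp, fun h => h, by simp⟩
  | cons d ds ih =>
    intro st
    obtain ⟨V1, ⟨e1, he1, he1p, he1c⟩, V3, V4, V5, V6⟩ := visitA_spec name n m cur st d
    obtain ⟨I1, ⟨e2, he2, he2p, he2c⟩, I3, I4, I5, I6⟩ := ih (visitA name n m cur st d)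
    simp only [List.foldl_cons]
    refine ⟨onlyBlank_trans V1 I1, ⟨e1 ++ e2, by rw [he2, he1, List.append_assoc], ?_, ?_⟩,
      ?_, fun p hp => I4 p (V4 p hp), fun h => I5 (V5 h), ?_⟩
    · intro w hw
      rcases List.mem_append.mp hw with h | h
      · obtain ⟨hb, hn, hd⟩ := he1p w h
        exact ⟨hb, hn, onlyBlank_dot I1 hd⟩
      · obtain ⟨hb, hn, hd⟩ := he2p w h
        exact ⟨hb, (onlyBlank_back V1 (fun hc => hname (hn.symm.trans hc))).trans hn, hd⟩
    · intro w hne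
      by_cases hc : getc (visitA name n m cur st d).1 w.1 w.2 = getc st.1 w.1 w.2
      · exact List.mem_append_right _ (he2c w (fun hc2 => hne (hc2.trans hc)))
      · exact List.mem_append_left _ (he1c w hc)
    · intro p hp
      rcases I3 p hp with h | ⟨dd, hdd, hb, hd1, hd2, hpe⟩
      · rcases V3 p h with h' | ⟨hb, hd1, hd2, hpe⟩
        · exact Or.inl h'
        · exact Or.inr ⟨d, List.mem_cons_self .., hb, hd1, hd2, hpe⟩
      · have hback := onlyBlank_back V1 (w := (cur.1 + dd.1, cur.2 + dd.2)) hd1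
        exact Or.inr ⟨dd, List.mem_cons_of_mem _ hdd, hb, hback.symm ▸ hd1, hback.symm ▸ hd2, hback.symm ▸ hpe⟩
    · intro dd hdd hb hd1 hd2
      rcases List.mem_cons.mp hdd with rfl | hmem
      · exact I4 _ (V6 hb hd1 hd2)
      · have hkeep := onlyBlank_keep V1 (w := (cur.1 + dd.1, cur.2 + dd.2)) hd2
        have := I6 dd hmem hb (hkeep.symm ▸ hd1) (hkeep.symm ▸ hd2)
        rwa [hkeep] at this

theorem bfsA_spec (name : Char) (hname : name ≠ '.') (n m : Int)
    (st : List (List Char) × List (Int × Int) × List (Char × Char)) :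
    OnlyBlank name st.1 (bfsA name n m st).1
    ∧ (∀ p ∈ (bfsA name n m st).2, p ∈ st.2.2
        ∨ ∃ w dd : Int × Int, dd ∈ dirsA ∧ InB n m (w.1 + dd.1, w.2 + dd.2)
            ∧ (w ∈ st.2.1 ∨ (InB n m w ∧ getc st.1 w.1 w.2 = name))
            ∧ getc st.1 (w.1 + dd.1) (w.2 + dd.2) ≠ '.'
            ∧ getc st.1 (w.1 + dd.1) (w.2 + dd.2) ≠ name
            ∧ p = sortedPair name (getc st.1 (w.1 + dd.1) (w.2 + dd.2)))
    ∧ (∀ p ∈ st.2.2, p ∈ (bfsA name n m st).2)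
    ∧ (st.2.2.Nodup → (bfsA name n m st).2.Nodup)
    ∧ (∀ w : Int × Int,
        (w ∈ st.2.1 ∨ (getc st.1 w.1 w.2 ≠ '.' ∧ getc (bfsA name n m st).1 w.1 w.2 = '.'))
        → ∀ dd ∈ dirsA, InB n m (w.1 + dd.1, w.2 + dd.2)
        → getc st.1 (w.1 + dd.1) (w.2 + dd.2) ≠ '.'
        → getc st.1 (w.1 + dd.1) (w.2 + dd.2) ≠ name
        → sortedPair name (getc st.1 (w.1 + dd.1) (w.2 + dd.2)) ∈ (bfsA name n m st).2) := by
  fun_induction bfsA name n m st with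
  | case1 g c =>
    refine ⟨onlyBlank_refl name g, fun p hp => Or.inl hp, fun p hp => hp, fun h => h, ?_⟩
    intro w hw
    rcases hw with hw | ⟨h1, h2⟩
    · exact absurd hw (List.not_mem_nil)
    · exact absurd h2 h1
  | case2 g cur q c ih =>
    obtain ⟨V1, ⟨e, he, hep, hec⟩, V3, V4, V5, V6⟩ :=
      foldVisit_spec name hname n m cur dirsA (g, q, c)
    obtain ⟨I1, I2, I3, I4, I5⟩ := ih
    dsimp only at V1 V3 V4 V5 V6 he hep hec I1 I2 I3 I4 I5 ⊢
    refine ⟨onlyBlank_trans V1 I1, ?_, fun p hp => I3 p (V4 p hp), fun h => I4 (V5 h), ?_⟩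
    · intro p hp
      rcases I2 p hp with h | ⟨w, dd, hdd, hb, hwq, hd1, hd2, hpe⟩
      · rcases V3 p h with h' | ⟨dd, hdd, hb, hd1, hd2, hpe⟩
        · exact Or.inl h'
        · exact Or.inr ⟨cur, dd, hdd, hb, Or.inl (List.mem_cons_self ..), hd1, hd2, hpe⟩
      · have hback := onlyBlank_back V1 (w := (w.1 + dd.1, w.2 + dd.2)) hd1
        refine Or.inr ⟨w, dd, hdd, hb, ?_, hback.symm ▸ hd1, hback.symm ▸ hd2, hback.symm ▸ hpe⟩
        rcases hwq with hwq | ⟨hbw, hnw⟩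
        · rw [he] at hwq
          rcases List.mem_append.mp hwq with h' | h'
          · exact Or.inl (List.mem_cons_of_mem _ h')
          · obtain ⟨hb', hn', _⟩ := hep w h'
            exact Or.inr ⟨hb', hn'⟩
        · exact Or.inr ⟨hbw, (onlyBlank_back V1 (fun hc => hname (hnw.symm.trans hc))).trans hnw⟩
    · intro w hw dd hdd hb hd1 hd2
      have hkeep := onlyBlank_keep V1 (w := (w.1 + dd.1, w.2 + dd.2)) hd2
      rcases hw with hw | ⟨hw1, hw2⟩
      · rcases List.mem_cons.mp hw with rfl | hmem
        · exact I3 _ (V6 dd hdd hb hd1 hd2)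
        · have := I5 w (Or.inl (by rw [he]; exact List.mem_append_left _ hmem)) dd hdd hb
            (hkeep.symm ▸ hd1) (hkeep.symm ▸ hd2)
          rwa [hkeep] at this
      · by_cases hch : getc (dirsA.foldl (visitA name n m cur) (g, q, c)).1 w.1 w.2 = getc g w.1 w.2
        · have := I5 w (Or.inr ⟨hch.symm ▸ hw1, hw2⟩) dd hdd hb
            (hkeep.symm ▸ hd1) (hkeep.symm ▸ hd2)
          rwa [hkeep] at this
        · have hwe := hec w hch
          have := I5 w (Or.inl (by rw [he]; exact List.mem_append_right _ hwe)) dd hdd hb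
            (hkeep.symm ▸ hd1) (hkeep.symm ▸ hd2)
          rwa [hkeep] at this

def Cov (G : List (List Char)) (n m : Int) (g : List (List Char)) (c : List (Char × Char)) : Prop :=
  ∀ u dd : Int × Int, dd ∈ dirsA → InB n m u → InB n m (u.1 + dd.1, u.2 + dd.2)
    → getc G u.1 u.2 ≠ '.' → getc G (u.1 + dd.1) (u.2 + dd.2) ≠ '.'
    → getc G (u.1 + dd.1) (u.2 + dd.2) ≠ getc G u.1 u.2
    → getc g u.1 u.2 = '.'
    → sortedPair (getc G u.1 u.2) (getc G (u.1 + dd.1) (u.2 + dd.2)) ∈ c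

theorem dirsA_neg : ∀ dd ∈ dirsA, ((-dd.1, -dd.2) : Int × Int) ∈ dirsA := by decide

theorem dirsA_nonzero : ∀ dd ∈ dirsA, dd.1 ≠ 0 ∨ dd.2 ≠ 0 := by decide

theorem sortedPair_comm (a b : Char) : sortedPair a b = sortedPair b a := by
  unfold sortedPair
  split_ifs with h1 h2 h2
  · have : a = b := le_antisymm h1 h2
    rw [this]
  · rfl
  · rfl
  · exact absurd ((le_total a b).resolve_left h1) h2

theorem subG_of_onlyBlank {name : Char} {g g' G : List (List Char)}
    (hsub : SubG g G) (hob : OnlyBlank name g g') : SubG g' G := by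
  intro w
  rcases hob w with h | ⟨_, hb⟩
  · rcases hsub w with h' | h'
    · exact Or.inl (h.trans h')
    · exact Or.inr (h.trans h')
  · exact Or.inr hb

theorem subG_setc {g G : List (List Char)} (i j : Int) (hsub : SubG g G) :
    SubG (setc g i j) G := by
  intro w
  rw [getc_setc]
  split_ifs with h
  · exact Or.inr rfl
  · exact hsub w

theorem subG_ne_dot {g G : List (List Char)} (hsub : SubG g G) {w : Int × Int}
    (h : getc g w.1 w.2 ≠ '.') : getc G w.1 w.2 = getc g w.1 w.2 := by
  rcases hsub w with h' | h'
  · exact h'.symm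
  · exact absurd h' h

theorem scanCell_spec (G : List (List Char)) (n m : Int) (g : List (List Char))
    (c : List (Char × Char)) (i j : Nat) (hi : (i : Int) < n) (hj : (j : Int) < m)
    (hsub : SubG g G) :
    SubG (scanCell n m (g, c) i j).1 G
    ∧ (∀ w : Int × Int, getc g w.1 w.2 = '.' → getc (scanCell n m (g, c) i j).1 w.1 w.2 = '.')
    ∧ (∀ p ∈ (scanCell n m (g, c) i j).2, p ∈ c ∨ PairIn G n m p)
    ∧ (∀ p ∈ c, p ∈ (scanCell n m (g, c) i j).2)
    ∧ (c.Nodup → (scanCell n m (g, c) i j).2.Nodup)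
    ∧ (Cov G n m g c → Cov G n m (scanCell n m (g, c) i j).1 (scanCell n m (g, c) i j).2)
    ∧ getc (scanCell n m (g, c) i j).1 (i : Int) (j : Int) = '.' := by
  unfold scanCell
  dsimp only
  split_ifs with h
  case neg =>
    push Not at h
    exact ⟨hsub, fun w hw => hw, fun p hp => Or.inl hp, fun p hp => hp, fun hc => hc,
      fun hc => hc, h⟩
  case pos =>
    set name := getc g (i : Int) (j : Int) with hnamedef
    have hGname : getc G (i : Int) (j : Int) = name :=
      subG_ne_dot hsub (w := ((i : Int), (j : Int))) h
    have hsub1 : SubG (setc g i j) G := subG_setc _ _ hsub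
    have hblank1 : getc (setc g (i : Int) (j : Int)) (i : Int) (j : Int) = '.' := by
      rw [getc_setc]; simp
    have hInB : InB n m ((i : Int), (j : Int)) := ⟨by omega, hi, by omega, hj⟩
    obtain ⟨R1, R2, R3, R4, R5⟩ :=
      bfsA_spec name h n m (setc g (i : Int) (j : Int), [((i : Int), (j : Int))], c)
    dsimp only at R1 R2 R3 R4 R5
    have hg1 : ∀ w : Int × Int, getc (setc g (i : Int) (j : Int)) w.1 w.2 =
        if w.1 = (i : Int) ∧ w.2 = (j : Int) then '.' else getc g w.1 w.2 := by
      intro w; rw [getc_setc]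
    refine ⟨subG_of_onlyBlank hsub1 R1, ?_, ?_, R3, R4, ?_,
      onlyBlank_dot (w := ((i : Int), (j : Int))) R1 hblank1⟩
    · intro w hw
      refine onlyBlank_dot R1 ?_
      rw [hg1 w]
      split_ifs with hc
      · rfl
      · exact hw
    · -- soundness
      intro p hp
      rcases R2 p hp with hp' | ⟨w, dd, hdd, hbx, hwq, hd1, hd2, hpe⟩
      · exact Or.inl hp'
      · right
        have hGw : getc G w.1 w.2 = name := by
          rcases hwq with hwq | ⟨_, hwn⟩
          · simp only [List.mem_singleton] at hwq
            rw [hwq]; exact hGname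
          · have := subG_ne_dot hsub1 (w := w) (by rw [hwn]; exact h)
            rw [this, hwn]
        have hInw : InB n m w := by
          rcases hwq with hwq | ⟨hbw, _⟩
          · simp only [List.mem_singleton] at hwq
            rw [hwq]; exact hInB
          · exact hbw
        have hGx : getc G (w.1 + dd.1) (w.2 + dd.2) =
            getc (setc g (i : Int) (j : Int)) (w.1 + dd.1) (w.2 + dd.2) :=
          subG_ne_dot hsub1 (w := (w.1 + dd.1, w.2 + dd.2)) hd1
        refine ⟨w, dd, hdd, hInw, hbx, by rw [hGw]; exact h, by rw [hGx]; exact hd1,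
          by rw [hGx, hGw]; exact hd2, by rw [hGx, hGw]; exact hpe⟩
    · -- Cov preservation
      intro hcov u dd hdd hbu hbx hGu hGx hGne hblank
      have hxne : (u.1 + dd.1, u.2 + dd.2) ≠ u := by
        have := dirsA_nonzero dd hdd
        intro hc
        have h1 : u.1 + dd.1 = u.1 := congrArg Prod.fst hc
        have h2 : u.2 + dd.2 = u.2 := congrArg Prod.snd hc
        omega
      have covsym : getc g (u.1 + dd.1) (u.2 + dd.2) = '.' →
          sortedPair (getc G u.1 u.2) (getc G (u.1 + dd.1) (u.2 + dd.2)) ∈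
            (bfsA name n m (setc g (i : Int) (j : Int), [((i : Int), (j : Int))], c)).2 := by
        intro hdot
        have := hcov (u.1 + dd.1, u.2 + dd.2) (-dd.1, -dd.2) (dirsA_neg dd hdd) hbx
          (by simpa only [add_neg_cancel_right] using hbu)
          hGx (by simpa only [add_neg_cancel_right] using hGu)
          (by simpa only [add_neg_cancel_right] using hGne.symm) hdot
        simp only [add_neg_cancel_right] at this
        rw [sortedPair_comm] at this
        exact R3 _ this
      by_cases hu1 : getc (setc g (i : Int) (j : Int)) u.1 u.2 = '.'
      · rw [hg1 u] at hu1
        by_cases hueq : u.1 = (i : Int) ∧ u.2 = (j : Int)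
        · -- u is the start cell; its G-char is name
          have hGu_name : getc G u.1 u.2 = name := by rw [hueq.1, hueq.2]; exact hGname
          by_cases hgx : getc g (u.1 + dd.1) (u.2 + dd.2) = '.'
          · exact covsym hgx
          · have hg1x : getc (setc g (i : Int) (j : Int)) (u.1 + dd.1) (u.2 + dd.2)
                = getc g (u.1 + dd.1) (u.2 + dd.2) := by
              rw [getc_setc]
              rw [if_neg (by
                intro hc
                exact hxne (by rw [Prod.ext_iff]; exact ⟨hc.1.trans hueq.1.symm, hc.2.trans hueq.2.symm⟩))]
            have hgxG : getc g (u.1 + dd.1) (u.2 + dd.2) = getc G (u.1 + dd.1) (u.2 + dd.2) :=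
              (subG_ne_dot hsub (w := (u.1 + dd.1, u.2 + dd.2)) hgx).symm
            have hxnm : getc (setc g (i : Int) (j : Int)) (u.1 + dd.1) (u.2 + dd.2) ≠ name := by
              rw [hg1x, hgxG, ← hGu_name]
              exact hGne
            have hr := R5 u (Or.inl (by simp only [List.mem_singleton]; exact Prod.ext hueq.1 hueq.2))
              dd hdd hbx (by rw [hg1x]; exact hgx) hxnm
            rw [hg1x, hgxG] at hr
            rw [hGu_name]
            exact hr
        · rw [if_neg hueq] at hu1
          exact R3 _ (hcov u dd hdd hbu hbx hGu hGx hGne hu1)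
      · -- u was blanked during this BFS run: its g1-char (hence G-char) is name
        have hblanked : getc (setc g (i : Int) (j : Int)) u.1 u.2 = name := by
          rcases R1 u with h' | ⟨ha, _⟩
          · exact absurd (h'.symm.trans hblank) hu1
          · exact ha
        have hGu_name : getc G u.1 u.2 = name := by
          rw [subG_ne_dot hsub1 (w := u) (by rw [hblanked]; exact h), hblanked]
        by_cases hg1x : getc (setc g (i : Int) (j : Int)) (u.1 + dd.1) (u.2 + dd.2) = '.'
        · rw [getc_setc] at hg1x
          split_ifs at hg1x with hxeq
          · exfalso
            apply hGne
            rw [hxeq.1, hxeq.2, hGname, hGu_name]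
          · exact covsym hg1x
        · have hxG : getc (setc g (i : Int) (j : Int)) (u.1 + dd.1) (u.2 + dd.2)
              = getc G (u.1 + dd.1) (u.2 + dd.2) :=
            (subG_ne_dot hsub1 (w := (u.1 + dd.1, u.2 + dd.2)) hg1x).symm
          have hxnm : getc (setc g (i : Int) (j : Int)) (u.1 + dd.1) (u.2 + dd.2) ≠ name := by
            rw [hxG, ← hGu_name]
            exact hGne
          have hr := R5 u (Or.inr ⟨hu1, hblank⟩) dd hdd hbx hg1x hxnm
          rw [hxG] at hr
          rw [hGu_name]
          exact hr

theorem scanFold_spec (G : List (List Char)) (n m : Int) :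
    ∀ (cs : List (Nat × Nat)) (g : List (List Char)) (c : List (Char × Char)),
    SubG g G → (∀ w ∈ cs, (w.1 : Int) < n ∧ (w.2 : Int) < m) →
    SubG (cs.foldl (fun st w => scanCell n m st w.1 w.2) (g, c)).1 G
    ∧ (∀ w : Int × Int, getc g w.1 w.2 = '.'
        → getc (cs.foldl (fun st w => scanCell n m st w.1 w.2) (g, c)).1 w.1 w.2 = '.')
    ∧ (∀ p ∈ (cs.foldl (fun st w => scanCell n m st w.1 w.2) (g, c)).2, p ∈ c ∨ PairIn G n m p)
    ∧ (∀ p ∈ c, p ∈ (cs.foldl (fun st w => scanCell n m st w.1 w.2) (g, c)).2)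
    ∧ (c.Nodup → (cs.foldl (fun st w => scanCell n m st w.1 w.2) (g, c)).2.Nodup)
    ∧ (Cov G n m g c → Cov G n m (cs.foldl (fun st w => scanCell n m st w.1 w.2) (g, c)).1
        (cs.foldl (fun st w => scanCell n m st w.1 w.2) (g, c)).2)
    ∧ (∀ w ∈ cs, getc (cs.foldl (fun st w => scanCell n m st w.1 w.2) (g, c)).1
        (w.1 : Int) (w.2 : Int) = '.') := by
  intro cs
  induction cs with
  | nil =>
    intro g c hsub _
    exact ⟨hsub, fun w hw => hw, fun p hp => Or.inl hp, fun p hp => hp, fun h => h,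
      fun h => h, by simp⟩
  | cons w0 cs ih =>
    intro g c hsub hcs
    obtain ⟨hw0n, hw0m⟩ := hcs w0 (List.mem_cons_self ..)
    obtain ⟨T1, T2, T3, T4, T5, T6, T7⟩ := scanCell_spec G n m g c w0.1 w0.2 hw0n hw0m hsub
    simp only [List.foldl_cons]
    have hpair : scanCell n m (g, c) w0.1 w0.2
        = ((scanCell n m (g, c) w0.1 w0.2).1, (scanCell n m (g, c) w0.1 w0.2).2) := rfl
    rw [hpair]
    obtain ⟨I1, I2, I3, I4, I5, I6, I7⟩ :=
      ih (scanCell n m (g, c) w0.1 w0.2).1 (scanCell n m (g, c) w0.1 w0.2).2 T1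
        (fun w hw => hcs w (List.mem_cons_of_mem _ hw))
    refine ⟨I1, fun w hw => I2 w (T2 w hw), ?_, fun p hp => I4 p (T4 p hp),
      fun h => I5 (T5 h), fun h => I6 (T6 h), ?_⟩
    · intro p hp
      rcases I3 p hp with h | h
      · exact T3 p h
      · exact Or.inr h
    · intro w hw
      rcases List.mem_cons.mp hw with rfl | hmem
      · exact I2 ((w.1 : Int), (w.2 : Int)) T7
      · exact I7 w hmem

theorem mem_cells {n m : Nat} {w : Nat × Nat} :
    w ∈ (List.range n).flatMap (fun i => (List.range m).map (fun j => (i, j)))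
      ↔ w.1 < n ∧ w.2 < m := by
  simp only [List.mem_flatMap, List.mem_map, List.mem_range]
  constructor
  · rintro ⟨i, hi, j, hj, rfl⟩
    exact ⟨hi, hj⟩
  · rintro ⟨h1, h2⟩
    exact ⟨w.1, h1, w.2, h2, rfl⟩

theorem scan_couple (G : List (List Char)) (n m : Nat) :
    ((List.range n).foldl
        (fun st i => (List.range m).foldl (fun st j => scanCell (n : Int) (m : Int) st i j) st)
        (G, ([] : List (Char × Char)))).2.Nodup
    ∧ ∀ p, (p ∈ ((List.range n).foldl
        (fun st i => (List.range m).foldl (fun st j => scanCell (n : Int) (m : Int) st i j) st)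
        (G, ([] : List (Char × Char)))).2 ↔ PairIn G n m p) := by
  have hflat : (List.range n).foldl
      (fun st i => (List.range m).foldl (fun st j => scanCell (n : Int) (m : Int) st i j) st)
      (G, ([] : List (Char × Char)))
      = ((List.range n).flatMap (fun i => (List.range m).map (fun j => (i, j)))).foldl
          (fun st w => scanCell (n : Int) (m : Int) st w.1 w.2) (G, []) := by
    rw [List.foldl_flatMap]
    congr 1
    funext st i
    rw [List.foldl_map]
  rw [hflat]
  have hsubG : SubG G G := fun _ => Or.inl rfl
  obtain ⟨U1, U2, U3, U4, U5, U6, U7⟩ := scanFold_spec G (n : Int) (m : Int)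
    ((List.range n).flatMap (fun i => (List.range m).map (fun j => (i, j)))) G [] hsubG
    (fun w hw => by
      obtain ⟨h1, h2⟩ := mem_cells.mp hw
      exact ⟨by exact_mod_cast h1, by exact_mod_cast h2⟩)
  refine ⟨U5 List.nodup_nil, fun p => ⟨?_, ?_⟩⟩
  · intro hp
    rcases U3 p hp with h | h
    · exact absurd h (List.not_mem_nil)
    · exact h
  · rintro ⟨u, dd, hdd, hbu, hbx, hGu, hGx, hGne, hpe⟩
    have hcov0 : Cov G (n : Int) (m : Int) G [] := by
      intro u' dd' _ _ _ hGu' _ _ hdot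
      exact absurd hdot hGu'
    have hcells : (u.1.toNat, u.2.toNat) ∈
        (List.range n).flatMap (fun i => (List.range m).map (fun j => (i, j))) := by
      apply mem_cells.mpr
      constructor
      · have := hbu.1; have := hbu.2.1; omega
      · have := hbu.2.2.1; have := hbu.2.2.2; omega
    have hblank := U7 _ hcells
    have hu1 : ((u.1.toNat : Int), (u.2.toNat : Int)) = u := by
      have h1 : (u.1.toNat : Int) = u.1 := Int.toNat_of_nonneg hbu.1
      have h2 : (u.2.toNat : Int) = u.2 := Int.toNat_of_nonneg hbu.2.2.1
      rw [Prod.ext_iff]; exact ⟨h1, h2⟩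
    rw [show ((u.1.toNat, u.2.toNat) : Nat × Nat).1 = u.1.toNat from rfl] at hblank
    have hblank' : getc ((((List.range n).flatMap
        (fun i => (List.range m).map (fun j => (i, j)))).foldl
        (fun st w => scanCell (n : Int) (m : Int) st w.1 w.2) (G, [])).1) u.1 u.2 = '.' := by
      rw [← (congrArg Prod.fst hu1), ← (congrArg Prod.snd hu1)]
      exact hblank
    have := U6 hcov0 u dd hdd hbu hbx hGu hGx hGne hblank'
    rw [hpe]
    exact this

theorem mem_foldl_upd {α β : Type} [BEq β] [LawfulBEq β]
    (upd : PySem.Set β → α → PySem.Set β) (Q : α → β → Prop)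
    (h : ∀ s a p, p ∈ upd s a ↔ p ∈ s ∨ Q a p) :
    ∀ (l : List α) (s : PySem.Set β) (p : β), p ∈ l.foldl upd s ↔ p ∈ s ∨ ∃ a ∈ l, Q a p := by
  intro l
  induction l with
  | nil => intro s p; simp
  | cons x t ih =>
    intro s p
    simp only [List.foldl_cons]
    rw [ih (upd s x) p, h s x p]
    constructor
    · rintro ((hp | hq) | ⟨a, ha, hq⟩)
      · exact Or.inl hp
      · exact Or.inr ⟨x, List.mem_cons_self .., hq⟩
      · exact Or.inr ⟨a, List.mem_cons_of_mem _ ha, hq⟩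
    · rintro (hp | ⟨a, ha, hq⟩)
      · exact Or.inl (Or.inl hp)
      · rcases List.mem_cons.mp ha with rfl | ha'
        · exact Or.inl (Or.inr hq)
        · exact Or.inr ⟨a, ha', hq⟩

theorem nodup_foldl_upd {α β : Type} [BEq β]
    (upd : PySem.Set β → α → PySem.Set β)
    (h : ∀ s a, List.Nodup s → List.Nodup (upd s a)) :
    ∀ (l : List α) (s : PySem.Set β), List.Nodup s → List.Nodup (l.foldl upd s) := by
  intro l
  induction l with
  | nil => intro s hs; exact hs
  | cons x t ih => intro s hs; exact ih (upd s x) (h s x hs)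

def PairInB (grid : List (List Char)) (n m : Nat) (p : Char × Char) : Prop :=
  ∃ i j : Nat, i < n ∧ j < m ∧ (grid.getD i []).getD j '.' ≠ '.'
    ∧ ∃ yx : Nat × Nat, yx ∈ [(i + 1, j), (i, j + 1)] ∧ yx.1 < n ∧ yx.2 < m
      ∧ (grid.getD yx.1 []).getD yx.2 '.' ≠ '.'
      ∧ (grid.getD yx.1 []).getD yx.2 '.' ≠ (grid.getD i []).getD j '.'
      ∧ p = (min ((grid.getD i []).getD j '.') ((grid.getD yx.1 []).getD yx.2 '.'),
             max ((grid.getD i []).getD j '.') ((grid.getD yx.1 []).getD yx.2 '.'))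

theorem alt_pairs_spec (grid : List (List Char)) (n m : Nat) :
    List.Nodup ((List.range n).foldl (fun ps i =>
      (List.range m).foldl (fun ps j =>
        if (grid.getD i []).getD j '.' = '.' then ps
        else [(i + 1, j), (i, j + 1)].foldl (fun ps yx =>
          if yx.1 < n ∧ yx.2 < m then
            if (grid.getD yx.1 []).getD yx.2 '.' ≠ '.'
                ∧ (grid.getD yx.1 []).getD yx.2 '.' ≠ (grid.getD i []).getD j '.' then
              PySem.Set.add ps (min ((grid.getD i []).getD j '.') ((grid.getD yx.1 []).getD yx.2 '.'),
                max ((grid.getD i []).getD j '.') ((grid.getD yx.1 []).getD yx.2 '.'))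
            else ps
          else ps) ps) ps)
      (PySem.Set.empty : PySem.Set (Char × Char)))
    ∧ ∀ p, (p ∈ (List.range n).foldl (fun ps i =>
      (List.range m).foldl (fun ps j =>
        if (grid.getD i []).getD j '.' = '.' then ps
        else [(i + 1, j), (i, j + 1)].foldl (fun ps yx =>
          if yx.1 < n ∧ yx.2 < m then
            if (grid.getD yx.1 []).getD yx.2 '.' ≠ '.'
                ∧ (grid.getD yx.1 []).getD yx.2 '.' ≠ (grid.getD i []).getD j '.' then
              PySem.Set.add ps (min ((grid.getD i []).getD j '.') ((grid.getD yx.1 []).getD yx.2 '.'),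
                max ((grid.getD i []).getD j '.') ((grid.getD yx.1 []).getD yx.2 '.'))
            else ps
          else ps) ps) ps)
      (PySem.Set.empty : PySem.Set (Char × Char))
      ↔ PairInB grid n m p) := by
  have hinner : ∀ (i : Nat) (s : PySem.Set (Char × Char)) (p : Char × Char),
      p ∈ (List.range m).foldl (fun ps j =>
        if (grid.getD i []).getD j '.' = '.' then ps
        else [(i + 1, j), (i, j + 1)].foldl (fun ps yx =>
          if yx.1 < n ∧ yx.2 < m then
            if (grid.getD yx.1 []).getD yx.2 '.' ≠ '.'
                ∧ (grid.getD yx.1 []).getD yx.2 '.' ≠ (grid.getD i []).getD j '.' then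
              PySem.Set.add ps (min ((grid.getD i []).getD j '.') ((grid.getD yx.1 []).getD yx.2 '.'),
                max ((grid.getD i []).getD j '.') ((grid.getD yx.1 []).getD yx.2 '.'))
            else ps
          else ps) ps) s
      ↔ p ∈ s ∨ ∃ j ∈ List.range m, (grid.getD i []).getD j '.' ≠ '.'
          ∧ ∃ yx ∈ [(i + 1, j), (i, j + 1)], yx.1 < n ∧ yx.2 < m
            ∧ (grid.getD yx.1 []).getD yx.2 '.' ≠ '.'
            ∧ (grid.getD yx.1 []).getD yx.2 '.' ≠ (grid.getD i []).getD j '.'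
            ∧ p = (min ((grid.getD i []).getD j '.') ((grid.getD yx.1 []).getD yx.2 '.'),
                   max ((grid.getD i []).getD j '.') ((grid.getD yx.1 []).getD yx.2 '.')) := by
    intro i
    apply mem_foldl_upd
    intro s j p
    by_cases ha : (grid.getD i []).getD j '.' = '.'
    · rw [if_pos ha]
      simp only [ha]
      constructor
      · intro h; exact Or.inl h
      · rintro (h | ⟨hne, _⟩)
        · exact h
        · exact absurd rfl hne
    · rw [if_neg ha]
      rw [mem_foldl_upd _ (fun yx p => yx.1 < n ∧ yx.2 < m
            ∧ (grid.getD yx.1 []).getD yx.2 '.' ≠ '.'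
            ∧ (grid.getD yx.1 []).getD yx.2 '.' ≠ (grid.getD i []).getD j '.'
            ∧ p = (min ((grid.getD i []).getD j '.') ((grid.getD yx.1 []).getD yx.2 '.'),
                   max ((grid.getD i []).getD j '.') ((grid.getD yx.1 []).getD yx.2 '.')))
          ?_ _ s p]
      · constructor
        · rintro (h | ⟨yx, hyx, hq⟩)
          · exact Or.inl h
          · exact Or.inr ⟨ha, yx, hyx, hq⟩
        · rintro (h | ⟨_, yx, hyx, hq⟩)
          · exact Or.inl h
          · exact Or.inr ⟨yx, hyx, hq⟩
      · intro s yx p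
        split_ifs with h1 h2
        · rw [PySem.Set.mem_add]
          constructor
          · rintro (h | h)
            · exact Or.inl h
            · exact Or.inr ⟨h1.1, h1.2, h2.1, h2.2, h⟩
          · rintro (h | ⟨_, _, h3, h4, h⟩)
            · exact Or.inl h
            · exact Or.inr h
        · constructor
          · exact fun h => Or.inl h
          · rintro (h | ⟨_, _, h3, h4, _⟩)
            · exact h
            · exact absurd ⟨h3, h4⟩ h2
        · constructor
          · exact fun h => Or.inl h
          · rintro (h | ⟨h2, h3, _⟩)
            · exact h
            · exact absurd ⟨h2, h3⟩ h1
  constructor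
  · apply nodup_foldl_upd _ ?_ _ _ List.nodup_nil
    intro s i hs
    apply nodup_foldl_upd _ ?_ _ _ hs
    intro s j hsj
    split_ifs with h1
    · exact hsj
    · apply nodup_foldl_upd _ ?_ _ _ hsj
      intro s yx hsx
      split_ifs with h2 h3
      · exact PySem.Set.nodup_add _ _ hsx
      · exact hsx
      · exact hsx
  · intro p
    rw [mem_foldl_upd _ (fun i p => ∃ j ∈ List.range m, (grid.getD i []).getD j '.' ≠ '.'
          ∧ ∃ yx ∈ [(i + 1, j), (i, j + 1)], yx.1 < n ∧ yx.2 < m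
            ∧ (grid.getD yx.1 []).getD yx.2 '.' ≠ '.'
            ∧ (grid.getD yx.1 []).getD yx.2 '.' ≠ (grid.getD i []).getD j '.'
            ∧ p = (min ((grid.getD i []).getD j '.') ((grid.getD yx.1 []).getD yx.2 '.'),
                   max ((grid.getD i []).getD j '.') ((grid.getD yx.1 []).getD yx.2 '.')))
        (fun s i p => hinner i s p) _ _ p]
    unfold PairInB
    simp only [List.mem_range, PySem.Set.empty, List.not_mem_nil, false_or]
    constructor
    · rintro ⟨i, hi, j, hj, hq⟩
      exact ⟨i, j, hi, hj, hq⟩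
    · rintro ⟨i, j, hi, hj, hq⟩
      exact ⟨i, hi, j, hj, hq⟩

theorem sortedPair_eq_minmax (a b : Char) : sortedPair a b = (min a b, max a b) := by
  unfold sortedPair
  rcases le_or_gt a b with h | h
  · rw [if_pos h, min_eq_left h, max_eq_right h]
  · rw [if_neg (not_le_of_gt h), min_eq_right (le_of_lt h), max_eq_left (le_of_lt h)]

theorem getc_of_nonneg (g : List (List Char)) {i j : Int} (hi : 0 ≤ i) (hj : 0 ≤ j) :
    getc g i j = (g.getD i.toNat []).getD j.toNat '.' := by
  simp [getc, hi, hj]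

theorem pairB_of_adj (G : List (List Char)) (n m : Nat) (i j i' j' : Nat)
    (hi : i < n) (hj : j < m) (hi' : i' < n) (hj' : j' < m)
    (hadj : (i' = i + 1 ∧ j' = j) ∨ (i' = i ∧ j' = j + 1))
    (ha : (G.getD i []).getD j '.' ≠ '.')
    (hb : (G.getD i' []).getD j' '.' ≠ '.')
    (hne : (G.getD i' []).getD j' '.' ≠ (G.getD i []).getD j '.') :
    PairInB G n m (min ((G.getD i []).getD j '.') ((G.getD i' []).getD j' '.'),
      max ((G.getD i []).getD j '.') ((G.getD i' []).getD j' '.')) := by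
  refine ⟨i, j, hi, hj, ha, (i', j'), ?_, hi', hj', hb, hne, rfl⟩
  rcases hadj with ⟨rfl, rfl⟩ | ⟨rfl, rfl⟩
  · exact List.mem_cons_self ..
  · exact List.mem_cons_of_mem _ (List.mem_cons_self ..)

theorem pairIn_iff_pairInB (G : List (List Char)) (n m : Nat) (p : Char × Char) :
    PairIn G (n : Int) (m : Int) p ↔ PairInB G n m p := by
  constructor
  · rintro ⟨u, dd, hdd, hbu, hbx, hGu, hGx, hGne, rfl⟩
    obtain ⟨hu1, hu2, hu3, hu4⟩ := hbu
    obtain ⟨hx1, hx2, hx3, hx4⟩ := hbx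
    dsimp only at hx1 hx2 hx3 hx4
    simp only [dirsA, List.mem_cons, List.not_mem_nil, or_false] at hdd
    rcases hdd with rfl | rfl | rfl | rfl
    · -- dd = (0, 1) : neighbour to the right
      dsimp only at hGx hGne hx1 hx2 hx3 hx4 ⊢
      rw [sortedPair_eq_minmax]
      rw [show u.1 + (0:Int) = u.1 by ring] at hGx hGne hx1 hx2 ⊢
      rw [getc_of_nonneg G hu1 hu3] at hGu hGne ⊢
      rw [getc_of_nonneg G hu1 (by omega : (0:Int) ≤ u.2 + 1)] at hGx hGne ⊢
      rw [show (u.2 + (1:Int)).toNat = u.2.toNat + 1 by omega] at hGx hGne ⊢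
      exact pairB_of_adj G n m u.1.toNat u.2.toNat u.1.toNat (u.2.toNat + 1)
        (by omega) (by omega) (by omega) (by omega) (Or.inr ⟨rfl, rfl⟩) hGu hGx hGne
    · -- dd = (0, -1) : neighbour to the left
      dsimp only at hGx hGne hx1 hx2 hx3 hx4 ⊢
      rw [sortedPair_eq_minmax, min_comm, max_comm]
      rw [show u.1 + (0:Int) = u.1 by ring] at hGx hGne hx1 hx2 ⊢
      rw [getc_of_nonneg G hu1 hu3] at hGu hGne ⊢
      rw [getc_of_nonneg G hu1 hx3] at hGx hGne ⊢
      rw [show u.2.toNat = (u.2 + (-1:Int)).toNat + 1 by omega] at hGu hGne ⊢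
      exact pairB_of_adj G n m u.1.toNat ((u.2 + (-1:Int)).toNat) u.1.toNat
        ((u.2 + (-1:Int)).toNat + 1)
        (by omega) (by omega) (by omega) (by omega) (Or.inr ⟨rfl, rfl⟩) hGx hGu (Ne.symm hGne)
    · -- dd = (1, 0) : neighbour below
      dsimp only at hGx hGne hx1 hx2 hx3 hx4 ⊢
      rw [sortedPair_eq_minmax]
      rw [show u.2 + (0:Int) = u.2 by ring] at hGx hGne hx3 hx4 ⊢
      rw [getc_of_nonneg G hu1 hu3] at hGu hGne ⊢
      rw [getc_of_nonneg G (by omega : (0:Int) ≤ u.1 + 1) hu3] at hGx hGne ⊢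
      rw [show (u.1 + (1:Int)).toNat = u.1.toNat + 1 by omega] at hGx hGne ⊢
      exact pairB_of_adj G n m u.1.toNat u.2.toNat (u.1.toNat + 1) u.2.toNat
        (by omega) (by omega) (by omega) (by omega) (Or.inl ⟨rfl, rfl⟩) hGu hGx hGne
    · -- dd = (-1, 0) : neighbour above
      dsimp only at hGx hGne hx1 hx2 hx3 hx4 ⊢
      rw [sortedPair_eq_minmax, min_comm, max_comm]
      rw [show u.2 + (0:Int) = u.2 by ring] at hGx hGne hx3 hx4 ⊢
      rw [getc_of_nonneg G hu1 hu3] at hGu hGne ⊢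
      rw [getc_of_nonneg G hx1 hu3] at hGx hGne ⊢
      rw [show u.1.toNat = (u.1 + (-1:Int)).toNat + 1 by omega] at hGu hGne ⊢
      exact pairB_of_adj G n m ((u.1 + (-1:Int)).toNat) u.2.toNat
        ((u.1 + (-1:Int)).toNat + 1) u.2.toNat
        (by omega) (by omega) (by omega) (by omega) (Or.inl ⟨rfl, rfl⟩) hGx hGu (Ne.symm hGne)
  · rintro ⟨i, j, hi, hj, ha, yx, hyx, h1, h2, hb1, hb2, rfl⟩
    simp only [List.mem_cons, List.not_mem_nil, or_false] at hyx
    rcases hyx with rfl | rfl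
    · dsimp only at h1 h2 hb1 hb2
      refine ⟨((i : Int), (j : Int)), (1, 0), by simp [dirsA], ?_, ?_, ?_, ?_, ?_, ?_⟩
      · refine ⟨?_, ?_, ?_, ?_⟩ <;> dsimp only <;> omega
      · refine ⟨?_, ?_, ?_, ?_⟩ <;> dsimp only <;> omega
      · dsimp only; rw [getc_natCast]; exact ha
      · dsimp only
        rw [show ((i:Int) + 1) = ((i+1 : Nat) : Int) by push_cast; ring,
          show ((j:Int) + 0) = ((j : Nat) : Int) by ring, getc_natCast]
        exact hb1
      · dsimp only
        rw [show ((i:Int) + 1) = ((i+1 : Nat) : Int) by push_cast; ring,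
          show ((j:Int) + 0) = ((j : Nat) : Int) by ring, getc_natCast, getc_natCast]
        exact hb2
      · dsimp only
        rw [show ((i:Int) + 1) = ((i+1 : Nat) : Int) by push_cast; ring,
          show ((j:Int) + 0) = ((j : Nat) : Int) by ring, getc_natCast, getc_natCast,
          sortedPair_eq_minmax]
    · dsimp only at h1 h2 hb1 hb2
      refine ⟨((i : Int), (j : Int)), (0, 1), by simp [dirsA], ?_, ?_, ?_, ?_, ?_, ?_⟩
      · refine ⟨?_, ?_, ?_, ?_⟩ <;> dsimp only <;> omega
      · refine ⟨?_, ?_, ?_, ?_⟩ <;> dsimp only <;> omega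
      · dsimp only; rw [getc_natCast]; exact ha
      · dsimp only
        rw [show ((j:Int) + 1) = ((j+1 : Nat) : Int) by push_cast; ring,
          show ((i:Int) + 0) = ((i : Nat) : Int) by ring, getc_natCast]
        exact hb1
      · dsimp only
        rw [show ((j:Int) + 1) = ((j+1 : Nat) : Int) by push_cast; ring,
          show ((i:Int) + 0) = ((i : Nat) : Int) by ring, getc_natCast, getc_natCast]
        exact hb2
      · dsimp only
        rw [show ((j:Int) + 1) = ((j+1 : Nat) : Int) by push_cast; ring,
          show ((i:Int) + 0) = ((i : Nat) : Int) by ring, getc_natCast, getc_natCast,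
          sortedPair_eq_minmax]

theorem if_lt_eq_max (mx v : Int) : (if mx < v then v else mx) = max mx v := by
  rcases le_or_gt v mx with h | h
  · rw [if_neg (not_lt.mpr h), max_eq_left h]
  · rw [if_pos h, max_eq_right h.le]

theorem maxD_eq_foldl_max (v : List Int) (hv : ∀ x ∈ v, 1 ≤ x) :
    PySem.List.maxD v (fun x => x) 0 = v.foldl max 0 := by
  cases v with
  | nil => rfl
  | cons x t =>
    unfold PySem.List.maxD
    rw [PySem.List.max?_id_cons]
    simp only [Option.getD_some, List.foldl_cons]
    rw [max_eq_right (by have := hv x (List.mem_cons_self ..); omega)]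

theorem countP_fst_eq_count (k : Char) (l : List (Char × Char)) :
    List.countP (fun p => p.1 == k) l = (l.map (·.1)).count k := by
  rw [List.count, List.countP_map]; rfl

theorem agg_eq (l P : List (Char × Char)) (hperm : l.Perm P) :
    (l.foldl (fun d p => d.modify p.1 [] (fun lst => lst ++ [p.2]))
        (PySem.Dict.empty : PySem.Dict Char (List Char))).keys.foldl
      (fun mx k => if mx < (((l.foldl (fun d p => d.modify p.1 [] (fun lst => lst ++ [p.2]))
            (PySem.Dict.empty : PySem.Dict Char (List Char))).getD k []).length : Int)
        then (((l.foldl (fun d p => d.modify p.1 [] (fun lst => lst ++ [p.2]))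
            (PySem.Dict.empty : PySem.Dict Char (List Char))).getD k []).length : Int)
        else mx) (0 : Int)
    = PySem.List.maxD (P.foldl (fun d p => d.insert p.1 (d.getD p.1 0 + 1))
        (PySem.Dict.empty : PySem.Dict Char Int)).values (fun x => x) 0 := by
  have hd : ∀ k : Char, ((l.foldl (fun d p => d.modify p.1 [] (fun lst => lst ++ [p.2]))
      (PySem.Dict.empty : PySem.Dict Char (List Char))).getD k [])
      = (l.filter (fun p => p.1 == k)).map (·.2) := by
    intro k
    rw [PySem.Dict.getD_foldl_modify_append]
    rfl
  have hkeysA : (l.foldl (fun d p => d.modify p.1 [] (fun lst => lst ++ [p.2]))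
      (PySem.Dict.empty : PySem.Dict Char (List Char))).keys
      = PySem.Set.ofList (l.map (·.1)) := by
    rw [PySem.Dict.keys_foldl_modify_key l (fun p => p.1) [] (fun _ p => (fun lst => lst ++ [p.2]))]
    rfl
  have hnodA : (PySem.Set.ofList (l.map (·.1))).Nodup := PySem.Set.nodup_ofList _
  have hcnt : (P.foldl (fun d p => d.insert p.1 (d.getD p.1 0 + 1))
      (PySem.Dict.empty : PySem.Dict Char Int)) = PySem.Dict.counter (P.map (·.1)) := by
    rw [← PySem.Dict.foldl_insert_getD_add_one_eq_counter, List.foldl_map]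
  rw [hkeysA, hcnt,
    PySem.Dict.values_eq_map_keys _ (PySem.Dict.nodup_keys_counter _) 0,
    PySem.Dict.keys_counter]
  simp only [hd, List.length_map, ← List.countP_eq_length_filter, PySem.Dict.getD_counter]
  rw [maxD_eq_foldl_max _ (by
    intro x hx
    simp only [List.mem_map] at hx
    obtain ⟨k, hk, rfl⟩ := hx
    have : k ∈ P.map (·.1) := (PySem.Set.mem_ofList _ _).mp hk
    have := List.count_pos_iff.mpr this
    omega)]
  rw [List.foldl_map]
  simp only [if_lt_eq_max, countP_fst_eq_count]
  have hfun : (fun (mx : Int) (k : Char) => max mx (((l.map (·.1)).count k : Nat) : Int))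
      = (fun (mx : Int) (k : Char) => max mx (((P.map (·.1)).count k : Nat) : Int)) := by
    funext mx k
    rw [(hperm.map (·.1)).count_eq]
  rw [hfun]
  have hkperm : (PySem.Set.ofList (l.map (·.1))).Perm (PySem.Set.ofList (P.map (·.1))) := by
    rw [List.perm_ext_iff_of_nodup hnodA (PySem.Set.nodup_ofList _)]
    intro k
    rw [PySem.Set.mem_ofList, PySem.Set.mem_ofList]
    exact (hperm.map (·.1)).mem_iff
  haveI : RightCommutative (fun (mx : Int) (k : Char) =>
      max mx ((List.count k (List.map (fun x => x.1) P) : Nat) : Int)) :=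
    ⟨fun b x y => max_right_comm b _ _⟩
  exact List.Perm.foldl_eq hkperm 0

-- ===== VERDICT (by name: the statement is the Claim_ definition above) =====
theorem solution_spec : Claim_equal_solution := by
  unfold Claim_equal_solution
  intro maps _ _
  unfold Spec_solution solution solution_alt
  dsimp only
  obtain ⟨hnodA, hmemA⟩ :=
    scan_couple (maps.map (fun v => v.toList)) maps.length ((maps.headD "").toList.length)
  obtain ⟨hnodB, hmemB⟩ :=
    alt_pairs_spec (maps.map (fun v => v.toList)) maps.length ((maps.headD "").toList.length)
  have hperm := (List.perm_ext_iff_of_nodup hnodA hnodB).mpr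
    (fun p => (hmemA p).trans
      ((pairIn_iff_pairInB (maps.map (fun v => v.toList)) maps.length
        ((maps.headD "").toList.length) p).trans (hmemB p).symm))
  congr 1
  · simp only [PySem.Set.len]
    exact_mod_cast congrArg Nat.cast hperm.length_eq
  congr 1
  exact agg_eq _ _ hperm
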